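-- pv_equiv track=rewrite | github.com/ishangote/Coding-Interviews-Python | Leetcode/Find Minimum in Rotated Sorted Array II/find_min_rotated_sorted_array_ii.py | find_minimum_ii
-- ===== SOURCE A (Python) =====
-- def find_minimum_ii(nums):
--    if not nums: return None
--    lo, hi = 0, len(nums) - 1
--    while lo < hi:
--       mid = (lo + hi) // 2
--       if nums[mid] > nums[hi]:
--          lo = mid + 1
--       else:
--          hi = mid if nums[hi] != nums[mid] else hi - 1
--    return nums[lo]
-- ===== SOURCE B (Python) =====
-- def find_minimum_ii(nums):
--     if not nums:
--         return None
--     return min(nums)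
-- ===== Notes on version B (the rewrite author's own statement) =====
-- stated objective: simpler
-- what changed: Replaces A's lo/hi binary search with a single linear reduction min(nums): the minimum of a rotated sorted array is its global minimum, so no divide-and-conquer is needed.
-- outside the precondition, e.g. on find_minimum_ii([1, 3, 2]): A returns 2, B returns 1
import Mathlib
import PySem

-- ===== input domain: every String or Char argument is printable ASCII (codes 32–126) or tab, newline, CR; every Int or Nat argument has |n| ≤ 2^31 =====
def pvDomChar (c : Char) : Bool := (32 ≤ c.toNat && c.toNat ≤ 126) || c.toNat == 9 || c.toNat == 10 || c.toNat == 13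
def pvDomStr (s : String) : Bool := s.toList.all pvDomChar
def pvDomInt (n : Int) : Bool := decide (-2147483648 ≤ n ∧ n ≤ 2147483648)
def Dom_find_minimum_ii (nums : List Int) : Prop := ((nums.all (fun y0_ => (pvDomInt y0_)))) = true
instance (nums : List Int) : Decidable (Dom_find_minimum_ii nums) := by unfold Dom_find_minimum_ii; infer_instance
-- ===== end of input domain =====

-- B replaces A's lo/hi binary search with a single linear reduction min(nums): on a rotated
-- sorted array the minimum is the global minimum (objective: simpler).

-- ===== PORT A =====
-- midpoint bound used by the loop's termination proof
theorem pvMidLt {lo hi : Int} (h : lo < hi) : PySem.Int.floordiv (lo + hi) 2 < hi := by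
  rw [PySem.Int.floordiv_lt_iff_lt_mul (by omega)]; omega

-- the 'while lo < hi' loop of A, step for step
def find_minimum_ii_loop (nums : List Int) (lo hi : Int) : Option Int :=
  if h : lo < hi then
    let mid := PySem.Int.floordiv (lo + hi) 2
    match PySem.List.pyGet? nums mid, PySem.List.pyGet? nums hi with
    | some nm, some nh =>
      if nm > nh then find_minimum_ii_loop nums (mid + 1) hi
      else if nh ≠ nm then find_minimum_ii_loop nums lo mid
      else find_minimum_ii_loop nums lo (hi - 1)
    | _, _ => none   -- IndexError (never reached from find_minimum_ii: indices stay in range)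
  else PySem.List.pyGet? nums lo
termination_by (hi - lo).toNat
decreasing_by
  · have h1 := (PySem.Int.floordiv_two_mid_bounds (le_of_lt h)).1
    have h2 := pvMidLt h; omega
  · have h1 := (PySem.Int.floordiv_two_mid_bounds (le_of_lt h)).1
    have h2 := pvMidLt h; omega
  · omega

def find_minimum_ii (nums : List Int) : Option Int :=
  if nums = [] then none
  else find_minimum_ii_loop nums 0 ((nums.length : Int) - 1)

-- ===== PORT B =====
def find_minimum_ii_alt (nums : List Int) : Option Int :=
  match nums with
  | [] => none
  | x :: t => some (t.foldl min x)   -- min(nums)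

-- ===== PRECONDITION & SPEC =====
-- Pre_ restricts to the function's stated natural domain — lists that are some rotation of a
-- non-decreasingly sorted list (this includes [], on which both return None) — because on any
-- other list A's binary search returns an arbitrary element with no specified meaning.
def Pre_find_minimum_ii (nums : List Int) : Prop :=
  ∃ k < nums.length + 1, List.Pairwise (· ≤ ·) (nums.drop k ++ nums.take k)
instance (nums : List Int) : Decidable (Pre_find_minimum_ii nums) := by
  unfold Pre_find_minimum_ii; infer_instance

def pvWitness_find_minimum_ii : List Int := [3, 1, 2]

def Spec_find_minimum_ii (nums : List Int) (out : Option Int) : Prop := out = find_minimum_ii_alt nums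
instance (nums : List Int) (out : Option Int) : Decidable (Spec_find_minimum_ii nums out) := by unfold Spec_find_minimum_ii; infer_instance

-- ===== CLAIM (what is proved, stated in full; the proofs are below) =====
def Claim_equal_find_minimum_ii : Prop := ∀ (nums : List Int), Dom_find_minimum_ii nums → Pre_find_minimum_ii nums → Spec_find_minimum_ii nums (find_minimum_ii nums)

-- ===== LEMMAS AND PROOFS =====

theorem pvWitness_ok : Dom_find_minimum_ii pvWitness_find_minimum_ii ∧ Pre_find_minimum_ii pvWitness_find_minimum_ii := by
  constructor
  · decide
  · exact ⟨1, by decide, by decide⟩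

-- Main loop invariant proof: if every index ≤ the minimum-candidate set lies in [lo,hi]
-- (precisely: every position j has some position k in [lo,hi] with nums[k] ≤ nums[j]),
-- and nums decomposes at pivot p into a sorted front, a sorted tail, with the tail ≤ the front,
-- then the loop returns a global minimum value.
theorem loop_spec (nums : List Int) (p : Nat)
    (hfront : ∀ i j : Nat, i ≤ j → j < p → j < nums.length → nums.getD i 0 ≤ nums.getD j 0)
    (htail : ∀ i j : Nat, p ≤ i → i ≤ j → j < nums.length → nums.getD i 0 ≤ nums.getD j 0)
    (hcross : ∀ i j : Nat, j < p → p ≤ i → i < nums.length → nums.getD i 0 ≤ nums.getD j 0) :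
    ∀ (fuel : Nat) (lo hi : Int), (hi - lo).toNat ≤ fuel → 0 ≤ lo → lo ≤ hi → hi < nums.length →
    (∀ j : Nat, j < nums.length → ∃ k : Nat, lo ≤ (k : Int) ∧ (k : Int) ≤ hi ∧
        nums.getD k 0 ≤ nums.getD j 0) →
    ∃ m : Int, find_minimum_ii_loop nums lo hi = some m ∧ m ∈ nums ∧
        ∀ j : Nat, j < nums.length → m ≤ nums.getD j 0 := by
  intro fuel
  induction fuel with
  | zero =>
    intro lo hi hfuel h0 hle hlt hinv
    have hlohi : lo = hi := by omega
    subst hlohi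
    rw [find_minimum_ii_loop]
    simp only [lt_irrefl, dite_false]
    have hloN : lo.toNat < nums.length := by omega
    refine ⟨nums.getD lo.toNat 0, ?_, ?_, ?_⟩
    · rw [PySem.List.pyGet?_of_nonneg _ h0, List.getElem?_eq_getElem hloN,
        List.getD_eq_getElem _ _ hloN]
    · rw [List.getD_eq_getElem _ _ hloN]; exact List.getElem_mem hloN
    · intro j hj
      obtain ⟨k, hk1, hk2, hk3⟩ := hinv j hj
      have : k = lo.toNat := by omega
      subst this; exact hk3
  | succ fuel ih =>
    intro lo hi hfuel h0 hle hlt hinv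
    rcases eq_or_lt_of_le hle with heq | hlohi
    · -- lo = hi : same as base case
      subst heq
      rw [find_minimum_ii_loop]
      simp only [lt_irrefl, dite_false]
      have hloN : lo.toNat < nums.length := by omega
      refine ⟨nums.getD lo.toNat 0, ?_, ?_, ?_⟩
      · rw [PySem.List.pyGet?_of_nonneg _ h0, List.getElem?_eq_getElem hloN,
          List.getD_eq_getElem _ _ hloN]
      · rw [List.getD_eq_getElem _ _ hloN]; exact List.getElem_mem hloN
      · intro j hj
        obtain ⟨k, hk1, hk2, hk3⟩ := hinv j hj
        have : k = lo.toNat := by omega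
        subst this; exact hk3
    · rw [find_minimum_ii_loop]
      simp only [hlohi, dite_true]
      set mid := PySem.Int.floordiv (lo + hi) 2 with hmid
      have hmlo : lo ≤ mid := (PySem.Int.floordiv_two_mid_bounds (le_of_lt hlohi)).1
      have hmhi : mid < hi := pvMidLt hlohi
      have hmidN : mid.toNat < nums.length := by omega
      have hhiN : hi.toNat < nums.length := by omega
      have hgm : PySem.List.pyGet? nums mid = some (nums.getD mid.toNat 0) := by
        rw [PySem.List.pyGet?_of_nonneg _ (by omega), List.getElem?_eq_getElem hmidN,
          List.getD_eq_getElem _ _ hmidN]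
      have hgh : PySem.List.pyGet? nums hi = some (nums.getD hi.toNat 0) := by
        rw [PySem.List.pyGet?_of_nonneg _ (by omega), List.getElem?_eq_getElem hhiN,
          List.getD_eq_getElem _ _ hhiN]
      rw [hgm, hgh]
      set gm := nums.getD mid.toNat 0
      set gh := nums.getD hi.toNat 0
      by_cases hcmp : gm > gh
      · -- lo = mid + 1
        simp only [hcmp, if_true]
        -- locate the pivot: mid.toNat < p ≤ hi.toNat
        have hmp : mid.toNat < p := by
          by_contra hc
          exact absurd (htail mid.toNat hi.toNat (by omega) (by omega) hhiN) (by omega)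
        have hph : p ≤ hi.toNat := by
          by_contra hc
          exact absurd (hfront mid.toNat hi.toNat (by omega) (by omega) hhiN) (by omega)
        apply ih (mid + 1) hi (by omega) (by omega) (by omega) hlt
        intro j hj
        obtain ⟨k, hk1, hk2, hk3⟩ := hinv j hj
        by_cases hkm : mid + 1 ≤ (k : Int)
        · exact ⟨k, hkm, hk2, hk3⟩
        · refine ⟨hi.toNat, by omega, by omega, ?_⟩
          have : nums.getD hi.toNat 0 ≤ nums.getD k 0 :=
            hcross hi.toNat k (by omega) hph hhiN
          omega
      · simp only [if_neg hcmp]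
        by_cases hne : gh ≠ gm
        · -- hi = mid
          simp only [if_pos hne]
          apply ih lo mid (by omega) h0 (by omega) (by omega)
          intro j hj
          obtain ⟨k, hk1, hk2, hk3⟩ := hinv j hj
          by_cases hkm : (k : Int) ≤ mid
          · exact ⟨k, hk1, hkm, hk3⟩
          · refine ⟨mid.toNat, by omega, by omega, ?_⟩
            have hgmk : gm ≤ nums.getD k 0 := by
              by_cases hpm : p ≤ mid.toNat
              · exact htail mid.toNat k hpm (by omega) (by omega)
              · by_cases hkp : k < p
                · exact hfront mid.toNat k (by omega) hkp (by omega)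
                · -- mid < p ≤ k ≤ hi: cross twice forces gh = gm, contradiction
                  exfalso
                  have h1 : gh ≤ gm := hcross hi.toNat mid.toNat (by omega) (by omega) hhiN
                  omega
            omega
        · -- hi = hi - 1  (gh = gm)
          simp only [if_neg hne]
          apply ih lo (hi - 1) (by omega) h0 (by omega) (by omega)
          intro j hj
          obtain ⟨k, hk1, hk2, hk3⟩ := hinv j hj
          by_cases hkm : (k : Int) ≤ hi - 1
          · exact ⟨k, hk1, hkm, hk3⟩
          · refine ⟨mid.toNat, by omega, by omega, ?_⟩
            have hk : k = hi.toNat := by omega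
            subst hk
            omega

-- Pre_ gives the three index-order facts used by loop_spec.
theorem pre_facts (nums : List Int) (h : Pre_find_minimum_ii nums) :
    ∃ p : Nat,
      (∀ i j : Nat, i ≤ j → j < p → j < nums.length → nums.getD i 0 ≤ nums.getD j 0) ∧
      (∀ i j : Nat, p ≤ i → i ≤ j → j < nums.length → nums.getD i 0 ≤ nums.getD j 0) ∧
      (∀ i j : Nat, j < p → p ≤ i → i < nums.length → nums.getD i 0 ≤ nums.getD j 0) := by
  obtain ⟨k, hk, hpw⟩ := h
  have hkle : k ≤ nums.length := by omega
  have hslen : (nums.drop k ++ nums.take k).length = nums.length := by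
    simp [List.length_append, List.length_drop, List.length_take]; omega
  have hget : ∀ (m : Nat) (hm : m < (nums.drop k ++ nums.take k).length),
      (nums.drop k ++ nums.take k)[m] =
        if m < nums.length - k then nums.getD (k + m) 0 else nums.getD (m - (nums.length - k)) 0 := by
    intro m hm
    by_cases hc : m < nums.length - k
    · simp only [hc, if_true]
      rw [List.getElem_append_left (by simp [List.length_drop]; omega),
        List.getElem_drop, List.getD_eq_getElem _ _ (by omega)]
    · simp only [hc, if_false]
      rw [List.getElem_append_right (by simp [List.length_drop]; omega)]
      simp only [List.length_drop]
      rw [List.getElem_take, List.getD_eq_getElem _ _ (by omega)]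
  have hp := List.pairwise_iff_getElem.mp hpw
  refine ⟨k, ?_, ?_, ?_⟩
  · -- front sorted: i ≤ j < k
    intro i j hij hjk hjn
    rcases eq_or_lt_of_le hij with rfl | hij'
    · exact le_refl _
    · have h1 := hp (i + (nums.length - k)) (j + (nums.length - k))
        (by omega) (by omega) (by omega)
      rw [hget _ (by omega), hget _ (by omega)] at h1
      simp only [if_neg (by omega : ¬ i + (nums.length - k) < nums.length - k),
        if_neg (by omega : ¬ j + (nums.length - k) < nums.length - k)] at h1
      have e1 : i + (nums.length - k) - (nums.length - k) = i := by omega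
      have e2 : j + (nums.length - k) - (nums.length - k) = j := by omega
      rwa [e1, e2] at h1
  · -- tail sorted: k ≤ i ≤ j < n
    intro i j hki hij hjn
    rcases eq_or_lt_of_le hij with rfl | hij'
    · exact le_refl _
    · have h1 := hp (i - k) (j - k) (by omega) (by omega) (by omega)
      rw [hget _ (by omega), hget _ (by omega)] at h1
      simp only [if_pos (by omega : i - k < nums.length - k),
        if_pos (by omega : j - k < nums.length - k)] at h1
      have e1 : k + (i - k) = i := by omega
      have e2 : k + (j - k) = j := by omega
      rwa [e1, e2] at h1
  · -- cross: tail elements ≤ front elements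
    intro i j hjk hki hin
    have h1 := hp (i - k) (j + (nums.length - k)) (by omega) (by omega) (by omega)
    rw [hget _ (by omega), hget _ (by omega)] at h1
    simp only [if_pos (by omega : i - k < nums.length - k),
      if_neg (by omega : ¬ j + (nums.length - k) < nums.length - k)] at h1
    have e1 : k + (i - k) = i := by omega
    have e2 : j + (nums.length - k) - (nums.length - k) = j := by omega
    rwa [e1, e2] at h1

-- ===== VERDICT (by name: the statement is the Claim_ definition above) =====
theorem find_minimum_ii_spec : Claim_equal_find_minimum_ii := by
  intro nums _hdom hpre
  unfold Spec_find_minimum_ii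
  match hn : nums with
  | [] => rfl
  | x :: t =>
    obtain ⟨p, hfront, htail, hcross⟩ := pre_facts (x :: t) hpre
    have hlen : 0 < (x :: t).length := by simp
    obtain ⟨m, hloop, hmem, hmin⟩ := loop_spec (x :: t) p hfront htail hcross
      (((x :: t).length : Int) - 1 - 0).toNat 0 (((x :: t).length : Int) - 1)
      (by omega) (by omega) (by omega) (by omega)
      (by
        intro j hj
        exact ⟨j, by omega, by omega, le_refl _⟩)
    unfold find_minimum_ii
    simp only [if_neg (by simp : ¬ x :: t = [])]
    rw [hloop]
    -- compare with min(nums)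
    have hBmin : PySem.List.min? (x :: t) (fun y => y) = some (t.foldl min x) :=
      PySem.List.min?_id_cons x t
    have hBmem : t.foldl min x ∈ x :: t := PySem.List.min?_mem hBmin
    have hBle : ∀ y ∈ x :: t, t.foldl min x ≤ y := by
      intro y hy; exact PySem.List.min?_isMin hBmin y hy
    have h1 : t.foldl min x ≤ m := hBle m hmem
    have h2 : m ≤ t.foldl min x := by
      obtain ⟨i, hi, hie⟩ := List.getElem_of_mem hBmem
      have := hmin i hi
      rwa [List.getD_eq_getElem _ _ hi, hie] at this
    have : m = t.foldl min x := le_antisymm h2 h1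
    rw [this]
    rfl
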